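-- pv_equiv track=rewrite | github.com/eXtc-be/AdventOfCode | 12/aoc_2023_12_A_1.py | _valid_combo
-- ===== SOURCE A (Python) =====
-- def _valid_combo(conditions: str, numbers: list[int]) -> bool:
--     groups = [group for group in conditions.split('.') if group]  # get non-empty groups
--
--     if len(groups) != len(numbers):
--         return False
--
--     for group, number in zip(groups, numbers):
--         if group.count('#') != number:
--             return False
--
--     return True
-- ===== SOURCE B (Python) =====
-- def _valid_combo(conditions: str, numbers: list[int]) -> bool:
--     # Single left-to-right scan: consume numbers with an iterator while
--     # counting '#' in each maximal non-'.' run; no intermediate group list.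
--     it = iter(numbers)
--     count = 0
--     in_run = False
--     for ch in conditions:
--         if ch == '.':
--             if in_run:
--                 if next(it, None) != count:
--                     return False
--                 count = 0
--                 in_run = False
--         else:
--             in_run = True
--             if ch == '#':
--                 count += 1
--     if in_run:
--         if next(it, None) != count:
--             return False
--     return next(it, None) is None
-- ===== Notes on version B (the rewrite author's own statement) =====
-- stated objective: alternative
-- what changed: Replaces split-into-group-list, length check and zip loop by a single character scan that counts '#' per non-'.' run and consumes the expected numbers from an iterator, returning False at the first mismatch without materialising any intermediate lists; same asymptotic cost, early exit on mismatch.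
import Mathlib
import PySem

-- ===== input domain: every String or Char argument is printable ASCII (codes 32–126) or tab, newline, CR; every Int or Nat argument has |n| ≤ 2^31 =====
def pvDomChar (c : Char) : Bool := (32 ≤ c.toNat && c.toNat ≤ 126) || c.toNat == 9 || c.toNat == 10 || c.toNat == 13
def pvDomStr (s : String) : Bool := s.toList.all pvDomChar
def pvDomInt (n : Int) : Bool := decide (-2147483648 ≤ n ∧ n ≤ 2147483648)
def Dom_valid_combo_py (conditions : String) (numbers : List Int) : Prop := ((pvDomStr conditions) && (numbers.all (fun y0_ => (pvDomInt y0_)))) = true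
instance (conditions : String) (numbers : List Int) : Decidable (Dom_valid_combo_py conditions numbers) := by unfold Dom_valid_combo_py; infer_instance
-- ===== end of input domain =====

-- B replaces A's split-filter-zip pipeline by a single character scan that counts '#'
-- per non-'.' run and consumes the expected numbers one by one (objective: alternative).

-- ===== PORT A =====
-- the 'for group, number in zip(groups, numbers)' loop with its early 'return False'
def validLoopA : List (String × Int) → Bool
  | [] => true
  | (g, n) :: rest =>
      if ((PySem.Str.count g "#" : Int)) ≠ n then false else validLoopA rest

def valid_combo_py (conditions : String) (numbers : List Int) : Bool :=
  -- groups = [group for group in conditions.split('.') if group]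
  -- (split? is `some …` here since the separator "." is nonempty; getD only discharges the Option)
  let groups := ((PySem.Str.split? conditions ".").getD []).filter (fun g => g ≠ "")
  if groups.length ≠ numbers.length then false
  else validLoopA (groups.zip numbers)

-- ===== PORT B =====
-- Source B's scan: state = remaining numbers (the iterator), current '#' count, in-run flag
def validComboScan : List Char → List Int → Int → Bool → Bool
  | [], rest, count, inRun =>
      -- post-loop: close an open run, then require the iterator exhausted
      if inRun then
        match rest with
        | [] => false                                   -- next(it, None) is None ≠ count
        | n :: rest' => if n ≠ count then false else decide (rest' = [])
      else decide (rest = [])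
  | c :: t, rest, count, inRun =>
      if c = '.' then
        if inRun then
          match rest with
          | [] => false
          | n :: rest' => if n ≠ count then false else validComboScan t rest' 0 false
        else validComboScan t rest count inRun
      else validComboScan t rest (if c = '#' then count + 1 else count) true

def valid_combo_py_alt (conditions : String) (numbers : List Int) : Bool :=
  validComboScan conditions.toList numbers 0 false

-- ===== PRECONDITION & SPEC =====
def Spec_valid_combo_py (conditions : String) (numbers : List Int) (out : Bool) : Prop := out = valid_combo_py_alt conditions numbers
instance (conditions : String) (numbers : List Int) (out : Bool) : Decidable (Spec_valid_combo_py conditions numbers out) := by unfold Spec_valid_combo_py; infer_instance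

-- ===== CLAIM (what is proved, stated in full; the proofs are below) =====
def Claim_equal_valid_combo_py : Prop := ∀ (conditions : String) (numbers : List Int), Dom_valid_combo_py conditions numbers → Spec_valid_combo_py conditions numbers (valid_combo_py conditions numbers)

-- ===== LEMMAS AND PROOFS =====

-- clean recursion computing PySem.Chars.splitOn cs ['.'] (cur is the current segment, reversed)
def segsFrom : List Char → List Char → List (List Char)
  | cur, [] => [cur.reverse]
  | cur, c :: t => if c = '.' then cur.reverse :: segsFrom [] t else segsFrom (c :: cur) t

-- the '#'-counts of the nonempty dot-separated segments; `some k` = inside a run with k '#' so far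
def scanCounts : Option Int → List Char → List Int
  | none, [] => []
  | some k, [] => [k]
  | none, c :: t => if c = '.' then scanCounts none t else scanCounts (some (if c = '#' then 1 else 0)) t
  | some k, c :: t => if c = '.' then k :: scanCounts none t else scanCounts (some (if c = '#' then k + 1 else k)) t

theorem splitOn_go_dot (fuel : Nat) : ∀ (l cur : List Char) (acc : List (List Char)),
    l.length ≤ fuel →
    PySem.Chars.splitOn.go ['.'] fuel l cur acc = acc.reverse ++ segsFrom cur l := by
  induction fuel with
  | zero =>
      intro l cur acc h
      have : l = [] := List.eq_nil_of_length_eq_zero (Nat.le_zero.mp h)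
      subst this
      simp [PySem.Chars.splitOn.go, segsFrom]
  | succ fuel ih =>
      intro l cur acc h
      cases l with
      | nil => simp [PySem.Chars.splitOn.go, segsFrom]
      | cons c t =>
          by_cases hc : c = '.'
          · subst hc
            have hpre : List.isPrefixOf ['.'] ('.' :: t) = true := by
              simp [List.isPrefixOf]
            rw [PySem.Chars.splitOn.go]
            simp only [hpre, if_true, List.length, List.drop]
            rw [ih t [] (cur.reverse :: acc) (by simp at h ⊢; omega)]
            simp [segsFrom]
          · have hpre : List.isPrefixOf ['.'] (c :: t) = false := by
              simp only [List.isPrefixOf, Bool.and_eq_false_iff, beq_eq_false_iff_ne]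
              exact Or.inl (fun h' => hc h'.symm)
            rw [PySem.Chars.splitOn.go]
            simp only [hpre, Bool.false_eq_true, if_false]
            rw [ih t (c :: cur) acc (by simp at h ⊢; omega)]
            simp [segsFrom, hc]

theorem splitOn_dot (cs : List Char) :
    PySem.Chars.splitOn cs ['.'] = segsFrom [] cs := by
  unfold PySem.Chars.splitOn
  exact splitOn_go_dot (cs.length + 1) cs [] [] (by omega)

theorem count_go_hash (fuel : Nat) : ∀ (l : List Char) (acc : Nat),
    l.length ≤ fuel →
    PySem.Chars.count.go ['#'] fuel l acc = acc + l.count '#' := by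
  induction fuel with
  | zero =>
      intro l acc h
      have : l = [] := List.eq_nil_of_length_eq_zero (Nat.le_zero.mp h)
      subst this
      simp [PySem.Chars.count.go]
  | succ fuel ih =>
      intro l acc h
      cases l with
      | nil => simp [PySem.Chars.count.go]
      | cons c t =>
          by_cases hc : c = '#'
          · subst hc
            have hpre : List.isPrefixOf ['#'] ('#' :: t) = true := by
              simp [List.isPrefixOf]
            rw [PySem.Chars.count.go]
            simp only [hpre, if_true, List.length, List.drop]
            rw [ih t (acc + 1) (by simp at h ⊢; omega)]
            simp
            omega
          · have hpre : List.isPrefixOf ['#'] (c :: t) = false := by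
              simp only [List.isPrefixOf, Bool.and_eq_false_iff, beq_eq_false_iff_ne]
              exact Or.inl (fun h' => hc h'.symm)
            rw [PySem.Chars.count.go]
            simp only [hpre, Bool.false_eq_true, if_false]
            rw [ih t acc (by simp at h ⊢; omega)]
            simp [hc]

theorem count_hash (s : List Char) : PySem.Chars.count s ['#'] = s.count '#' := by
  unfold PySem.Chars.count
  simp [count_go_hash s.length s 0 (le_refl _)]

-- the nonempty segments' counts are scanCounts
theorem segs_scanCounts : ∀ (cs cur : List Char),
    ((segsFrom cur cs).filter (· ≠ ([] : List Char))).map (fun g => (g.count '#' : Int))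
      = scanCounts (if cur.isEmpty then none else some ((cur.count '#' : Int))) cs := by
  intro cs
  induction cs with
  | nil =>
      intro cur
      cases cur with
      | nil => simp [segsFrom, scanCounts]
      | cons a cur' =>
          simp [segsFrom, scanCounts, List.filter, List.count_reverse]
          push_cast [List.count_cons]
          by_cases hh : a = '#' <;> simp [hh]
  | cons c t ih =>
      intro cur
      by_cases hc : c = '.'
      · subst hc
        cases cur with
        | nil =>
            simp only [segsFrom, if_true, List.isEmpty_nil, scanCounts, List.reverse_nil]
            simpa using ih []
        | cons a cur' =>
            simp only [segsFrom, if_true, List.isEmpty_cons]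
            have h2 := ih []
            simp only [List.isEmpty_nil, if_true] at h2
            simp [List.filter, List.count_reverse, scanCounts]
            push_cast [List.count_cons]
            constructor
            · by_cases hh : a = '#' <;> simp [hh]
            · simpa [List.filter] using h2
      · simp only [segsFrom, hc, if_false]
        have h2 := ih (c :: cur)
        simp only [List.isEmpty_cons, Bool.false_eq_true, if_false] at h2
        rw [h2]
        cases cur with
        | nil => by_cases hh : c = '#' <;> simp [scanCounts, hc, hh]
        | cons a cur' =>
            by_cases hh : c = '#' <;>
              simp [scanCounts, hc, hh, List.count_cons]
  

-- B's scan decides 'the counts equal the remaining numbers'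
theorem scan_eq_decide : ∀ (cs : List Char) (rest : List Int),
    (validComboScan cs rest 0 false = decide (scanCounts none cs = rest))
    ∧ ∀ (k : Int), validComboScan cs rest k true = decide (scanCounts (some k) cs = rest) := by
  intro cs
  induction cs with
  | nil =>
      intro rest
      refine ⟨by cases rest <;> simp [validComboScan, scanCounts, eq_comm], ?_⟩
      intro k
      cases rest with
      | nil => simp [validComboScan, scanCounts]
      | cons n rest' =>
          by_cases hn : n = k <;> simp [validComboScan, scanCounts, hn, eq_comm]
  | cons c t ih =>
      intro rest
      by_cases hc : c = '.'
      · subst hc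
        refine ⟨by simpa [validComboScan, scanCounts] using (ih rest).1, ?_⟩
        intro k
        cases rest with
        | nil => simp [validComboScan, scanCounts]
        | cons n rest' =>
            by_cases hn : n = k
            · simp [validComboScan, scanCounts, hn, (ih rest').1]
            · simp [validComboScan, scanCounts, hn]
              exact fun h => absurd h.symm hn
      · constructor
        · simpa [validComboScan, scanCounts, hc] using ((ih rest).2 _)
        · intro k
          simpa [validComboScan, scanCounts, hc] using ((ih rest).2 _)

-- A's length-check + zip loop decides 'the counts equal the numbers'
theorem loopA_eq_decide : ∀ (gs : List (List Char)) (ns : List Int),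
    (if (gs.map String.ofList).length ≠ ns.length then false
     else validLoopA ((gs.map String.ofList).zip ns))
      = decide (gs.map (fun g => (g.count '#' : Int)) = ns) := by
  intro gs
  induction gs with
  | nil => intro ns; cases ns <;> simp [validLoopA]
  | cons g gs' ih =>
      intro ns
      cases ns with
      | nil => simp
      | cons n ns' =>
          by_cases hl : gs'.length = ns'.length
          · by_cases hn : (g.count '#' : Int) = n <;>
              simp [validLoopA, count_hash, hn, hl, ← ih ns']
          · have : (gs'.map (fun g => (g.count '#' : Int))) ≠ ns' := by
              intro h
              exact hl (by simpa using congrArg List.length h)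
            simp [hl, this]

-- ===== VERDICT (by name: the statement is the Claim_ definition above) =====
theorem valid_combo_py_spec : Claim_equal_valid_combo_py := by
  intro conditions numbers _
  unfold Spec_valid_combo_py valid_combo_py valid_combo_py_alt
  have hsplit : PySem.Str.split? conditions "." =
      some ((segsFrom [] conditions.toList).map String.ofList) := by
    simp [PySem.Str.split?, PySem.Chars.split?, splitOn_dot]
  rw [hsplit]
  have hfilter : (((segsFrom [] conditions.toList).map String.ofList).filter (fun g => g ≠ "")) =
      ((segsFrom [] conditions.toList).filter (· ≠ ([] : List Char))).map String.ofList := by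
    rw [List.filter_map]
    exact congrArg _ (List.filter_congr (fun l _ => by simp))
  simp only [Option.getD_some, hfilter]
  rw [loopA_eq_decide]
  have hsegs := segs_scanCounts conditions.toList []
  simp only [List.isEmpty_nil, if_true] at hsegs
  rw [hsegs, ← (scan_eq_decide conditions.toList numbers).1]
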